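-- pv_equiv track=rewrite | github.com/euphwes/advent-of-code | 2017/day_4.py | _is_valid_v2
-- ===== SOURCE A (Python) =====
-- from collections import Counter
--
-- def _is_valid_v2(phrase):
--     """ A phrase is valid if no words are anagrams of another. """
--
--     word_counters = list()
--     for word in phrase:
--         letter_counts = Counter(word)
--
--         # If this counter of letters in the word already matches another word whose
--         # letters have been counted, this is an anagram and the passphrase is invalid.
--         if letter_counts in word_counters:
--             return False
--         else:
--             word_counters.append(letter_counts)
--
--     return True
-- ===== SOURCE B (Python) =====
-- def _is_valid_v2(phrase):
--     """ A phrase is valid if no words are anagrams of another. """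
--
--     # Staged passes: (1) map every word to its canonical sorted-letters
--     # signature, (2) sort the signatures, (3) one adjacent-pair scan of the
--     # sorted list -- any two anagrams end up adjacent, so the phrase is valid
--     # exactly when no two neighbouring signatures are equal.
--     signatures = sorted(''.join(sorted(word)) for word in phrase)
--     return all(a != b for a, b in zip(signatures, signatures[1:]))
-- ===== Notes on version B (the rewrite author's own statement) =====
-- stated objective: alternative
-- what changed: A keeps a letter Counter per word and answers each new word by a linear scan of dict comparisons over all stored Counters, returning False the moment one matches; B is staged with no early exit: it builds all sorted-letter signatures, sorts that list, and declares the phrase valid iff a single adjacent-pair scan finds no equal neighbours.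
import Mathlib
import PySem

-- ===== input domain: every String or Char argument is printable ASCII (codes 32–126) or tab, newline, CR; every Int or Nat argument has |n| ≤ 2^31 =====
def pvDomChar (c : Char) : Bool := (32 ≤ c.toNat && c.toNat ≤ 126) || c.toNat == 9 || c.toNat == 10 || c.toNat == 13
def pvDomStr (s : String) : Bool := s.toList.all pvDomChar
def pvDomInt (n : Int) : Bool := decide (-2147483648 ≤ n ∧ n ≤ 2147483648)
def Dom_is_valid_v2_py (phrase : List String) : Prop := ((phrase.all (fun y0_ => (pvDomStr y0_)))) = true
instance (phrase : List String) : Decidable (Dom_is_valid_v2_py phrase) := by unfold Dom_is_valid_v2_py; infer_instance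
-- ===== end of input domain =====

-- B replaces A's per-word linear scan over stored letter Counters with staged passes:
-- map words to sorted-letter signatures, sort the signatures, then one adjacent-pair
-- scan; objective: alternative (a different traversal shape, no early exit).


-- ===== PORT A =====
-- Python dict equality d1 == d2 (same key set, same value at each key), as used by
-- 'letter_counts in word_counters'.  Exact for the dicts arising here: Counters built
-- from strings carry only positive counts, so key-set + value comparison is Counter.__eq__.
def pyDictEq (d1 d2 : PySem.Dict Char Int) : Bool :=
  (d1.keys.all (fun k => d2.contains k)) &&
  (d2.keys.all (fun k => d1.contains k)) &&
  (d1.keys.all (fun k => d1.getD k 0 == d2.getD k 0))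

-- the 'for word in phrase' loop of A, with its accumulator word_counters
def isValidLoopA : List String → List (PySem.Dict Char Int) → Bool
  | [], _ => true
  | w :: rest, word_counters =>
      let letter_counts := PySem.Dict.counter w.toList
      if word_counters.any (fun d => pyDictEq d letter_counts) then false
      else isValidLoopA rest (word_counters ++ [letter_counts])

def is_valid_v2_py (phrase : List String) : Bool := isValidLoopA phrase []

-- ===== PORT B =====
-- ''.join(sorted(word))
def sigOf (w : String) : String := String.ofList (PySem.List.sorted w.toList (fun c => c))

-- all(a != b for a, b in zip(signatures, signatures[1:])): adjacent-pair scan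
def allAdjNe : List String → Bool
  | a :: b :: t => (a != b) && allAdjNe (b :: t)
  | _ => true

def is_valid_v2_py_alt (phrase : List String) : Bool :=
  allAdjNe (PySem.List.sorted (phrase.map sigOf) (fun s => s))

-- ===== PRECONDITION & SPEC =====
def Spec_is_valid_v2_py (phrase : List String) (out : Bool) : Prop := out = is_valid_v2_py_alt phrase
instance (phrase : List String) (out : Bool) : Decidable (Spec_is_valid_v2_py phrase out) := by unfold Spec_is_valid_v2_py; infer_instance

-- ===== CLAIM (what is proved, stated in full; the proofs are below) =====
def Claim_equal_is_valid_v2_py : Prop := ∀ (phrase : List String), Dom_is_valid_v2_py phrase → Spec_is_valid_v2_py phrase (is_valid_v2_py phrase)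

-- ===== LEMMAS AND PROOFS =====

-- Counter equality is char-multiset equality
lemma pyDictEq_counter_iff (u v : List Char) :
    pyDictEq (PySem.Dict.counter u) (PySem.Dict.counter v) = true ↔ ∀ c, u.count c = v.count c := by
  simp only [pyDictEq, Bool.and_eq_true, List.all_eq_true, PySem.Dict.keys_counter,
    PySem.Dict.contains_counter, PySem.Dict.getD_counter, beq_iff_eq]
  constructor
  · rintro ⟨⟨h1, h2⟩, h3⟩ c
    by_cases hu : c ∈ u
    · have := h3 c (by simpa [PySem.Set.mem_ofList] using hu)
      exact_mod_cast this
    · by_cases hv : c ∈ v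
      · have := h2 c (by simpa [PySem.Set.mem_ofList] using hv)
        rw [List.contains_eq_mem, decide_eq_true_eq] at this
        exact absurd this hu
      · rw [List.count_eq_zero_of_not_mem hu, List.count_eq_zero_of_not_mem hv]
  · intro h
    refine ⟨⟨?_, ?_⟩, ?_⟩
    · intro k hk
      have hk' : k ∈ u := by simpa [PySem.Set.mem_ofList] using hk
      have : 0 < v.count k := by
        rw [← h k]; exact List.count_pos_iff.mpr hk'
      simpa [List.contains_eq_mem] using List.count_pos_iff.mp this
    · intro k hk
      have hk' : k ∈ v := by simpa [PySem.Set.mem_ofList] using hk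
      have : 0 < u.count k := by
        rw [h k]; exact List.count_pos_iff.mpr hk'
      simpa [List.contains_eq_mem] using List.count_pos_iff.mp this
    · intro k _
      exact_mod_cast h k

-- … and char-multiset equality is signature equality
lemma pyDictEq_iff_sig (w v : String) :
    pyDictEq (PySem.Dict.counter v.toList) (PySem.Dict.counter w.toList) = true ↔ sigOf v = sigOf w := by
  rw [pyDictEq_counter_iff, ← List.perm_iff_count, ← PySem.List.sorted_id_eq_sorted_id_iff_perm]
  unfold sigOf
  constructor
  · intro h; rw [h]
  · intro h
    have := congrArg String.toList h
    simpa using this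

-- invariant of A's loop: true iff the remaining signatures are distinct and avoid the stored ones
lemma isValidLoopA_iff (rest ws : List String) :
    isValidLoopA rest (ws.map (fun w => PySem.Dict.counter w.toList)) = true ↔
      ((rest.map sigOf).Nodup ∧ ∀ w ∈ rest, sigOf w ∉ ws.map sigOf) := by
  induction rest generalizing ws with
  | nil => simp [isValidLoopA]
  | cons w t ih =>
    rw [isValidLoopA]
    simp only [List.any_map, Function.comp_def]
    have hany : (ws.any fun v => pyDictEq (PySem.Dict.counter v.toList) (PySem.Dict.counter w.toList)) = true
        ↔ sigOf w ∈ ws.map sigOf := by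
      simp only [List.any_eq_true, List.mem_map]
      constructor
      · rintro ⟨v, hv, hEq⟩
        exact ⟨v, hv, (pyDictEq_iff_sig w v).mp hEq⟩
      · rintro ⟨v, hv, hEq⟩
        exact ⟨v, hv, (pyDictEq_iff_sig w v).mpr hEq⟩
    by_cases hmem : sigOf w ∈ ws.map sigOf
    · rw [if_pos (hany.mpr hmem)]
      simp only [Bool.false_eq_true, false_iff, not_and]
      intro _ hall
      exact hall w (List.mem_cons_self ..) hmem
    · rw [if_neg (by rw [hany]; exact hmem)]
      have := ih (ws ++ [w])
      simp only [List.map_append, List.map_cons, List.map_nil] at this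
      rw [this]
      constructor
      · rintro ⟨hnd, hall⟩
        refine ⟨List.nodup_cons.mpr ⟨?_, hnd⟩, ?_⟩
        · intro hc
          rcases List.mem_map.mp hc with ⟨v, hv, hEq⟩
          exact (hall v hv) (List.mem_append.mpr (Or.inr (by simp [hEq])))
        · intro v hv
          rcases List.mem_cons.mp hv with h1 | h2
          · subst h1; exact hmem
          · intro hc
            exact hall v h2 (List.mem_append.mpr (Or.inl hc))
      · rintro ⟨hnd, hall⟩
        rw [List.map_cons, List.nodup_cons] at hnd
        refine ⟨hnd.2, ?_⟩
        intro v hv hc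
        rcases List.mem_append.mp hc with h1 | h2
        · exact hall v (List.mem_cons_of_mem _ hv) h1
        · have hvw : sigOf v = sigOf w := by simpa using h2
          exact hnd.1 (List.mem_map.mpr ⟨v, hv, hvw⟩)

lemma A_iff (phrase : List String) :
    is_valid_v2_py phrase = true ↔ (phrase.map sigOf).Nodup := by
  have := isValidLoopA_iff phrase []
  simpa [is_valid_v2_py] using this

-- on a (≤)-sorted list, no adjacent duplicates is exactly Nodup
lemma allAdjNe_iff_nodup : ∀ (ss : List String), ss.Pairwise (· ≤ ·) →
    (allAdjNe ss = true ↔ ss.Nodup)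
  | [], _ => by simp [allAdjNe]
  | [a], _ => by simp [allAdjNe]
  | a :: b :: t, hp => by
    have hab : a ≤ b := (List.pairwise_cons.mp hp).1 b (List.mem_cons_self ..)
    have htail := (List.pairwise_cons.mp hp).2
    have ih := allAdjNe_iff_nodup (b :: t) htail
    rw [allAdjNe, Bool.and_eq_true, bne_iff_ne, ih]
    constructor
    · rintro ⟨hne, hnd⟩
      refine List.nodup_cons.mpr ⟨fun hc => ?_, hnd⟩
      rcases List.mem_cons.mp hc with h1 | h2
      · exact hne h1
      · have hba : b ≤ a := (List.pairwise_cons.mp htail).1 a h2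
        exact hne (le_antisymm hab hba)
    · intro h
      have h' := List.nodup_cons.mp h
      exact ⟨fun he => h'.1 (he ▸ List.mem_cons_self ..), h'.2⟩

lemma B_iff (phrase : List String) :
    is_valid_v2_py_alt phrase = true ↔ (phrase.map sigOf).Nodup := by
  unfold is_valid_v2_py_alt
  rw [allAdjNe_iff_nodup _ (PySem.List.sorted_pairwise _ _)]
  exact (PySem.List.sorted_perm (phrase.map sigOf) (fun s => s) false).nodup_iff

-- ===== VERDICT (by name: the statement is the Claim_ definition above) =====
theorem is_valid_v2_py_spec : Claim_equal_is_valid_v2_py := by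
  intro phrase _
  unfold Spec_is_valid_v2_py
  rw [Bool.eq_iff_iff, A_iff, B_iff]
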